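-- pv_equiv track=rewrite | github.com/rose-kaks/news-4-you | news_pipeline.py | convert_noise_to_clusters
-- ===== SOURCE A (Python) =====
-- def convert_noise_to_clusters(labels):
--     """
--     HDBSCAN labels outliers as -1 (noise). This converts each noise point
--     to its own unique cluster so we don't lose articles.
--
--     Args:
--         labels: Array of cluster labels from HDBSCAN
--
--     Returns:
--         New labels array with noise points assigned unique IDs
--     """
--     new_labels = labels.copy()
--     # Start new IDs from the current max label + 1
--     max_label = max(labels) if len(labels) > 0 else 0
--     # Give each noise point its own cluster ID
--     for i, label in enumerate(labels):
--         if label == -1: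
--             max_label += 1
--             new_labels[i] = max_label
--     return new_labels
-- ===== SOURCE B (Python) =====
-- def convert_noise_to_clusters(labels):
--     """Prefix-count formulation: new noise IDs are base + running noise count,
--     assigned via a masked comprehension over precomputed cumulative counts."""
--     base = max(labels, default=0)
--     cum = []
--     total = 0
--     for x in labels:
--         total += (x == -1)
--         cum.append(total)
--     return [base + c if x == -1 else x for x, c in zip(labels, cum)]
-- ===== Notes on version B (the rewrite author's own statement) =====
-- stated objective: alternative
-- what changed: Replaces A's in-place index mutation of a copied list driven by an incrementing max_label with a cumulative-noise-count pass plus a masked zip-comprehension that writes base + prefix-count for each noise entry (the vectorized cumsum formulation in plain Python).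
import Mathlib
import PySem

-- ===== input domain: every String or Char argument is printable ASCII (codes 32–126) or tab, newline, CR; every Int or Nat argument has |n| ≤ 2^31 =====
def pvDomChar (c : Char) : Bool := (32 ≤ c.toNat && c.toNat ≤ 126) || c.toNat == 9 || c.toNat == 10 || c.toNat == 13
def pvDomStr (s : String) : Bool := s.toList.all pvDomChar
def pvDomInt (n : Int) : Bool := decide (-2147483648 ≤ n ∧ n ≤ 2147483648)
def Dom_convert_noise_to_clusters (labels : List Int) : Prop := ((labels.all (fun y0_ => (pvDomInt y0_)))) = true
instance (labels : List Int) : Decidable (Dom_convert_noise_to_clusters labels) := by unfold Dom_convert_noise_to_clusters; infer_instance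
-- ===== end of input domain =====

-- B replaces A's in-place mutation with a running max_label by a prefix-count pass
-- plus a masked zip-comprehension (alternative formulation, same cost).

-- ===== PORT A =====
-- the 'for i, label in enumerate(labels)' loop: state = (i, max_label, new_labels)
def pvALoop : List Int → Nat → Int → List Int → List Int
  | [], _, _, new_labels => new_labels
  | label :: rest, i, max_label, new_labels =>
    if label = -1 then
      pvALoop rest (i + 1) (max_label + 1) (new_labels.set i (max_label + 1))
    else
      pvALoop rest (i + 1) max_label new_labels

def convert_noise_to_clusters (labels : List Int) : List Int :=
  let new_labels := labels                                   -- labels.copy()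
  let max_label := if labels.length > 0 then (PySem.List.max? labels (fun x => x)).getD 0 else 0
  pvALoop labels 0 max_label new_labels

-- ===== PORT B =====
def convert_noise_to_clusters_alt (labels : List Int) : List Int :=
  let base := (PySem.List.max? labels (fun x => x)).getD 0   -- max(labels, default=0)
  -- cum: running count of noise entries (the 'total/cum.append' loop as a scan)
  let cum := ((labels.map (fun x => if x = -1 then (1 : Int) else 0)).scanl (· + ·) 0).tail
  (labels.zip cum).map (fun p => if p.1 = -1 then base + p.2 else p.1)

-- ===== PRECONDITION & SPEC =====
def Spec_convert_noise_to_clusters (labels : List Int) (out : List Int) : Prop := out = convert_noise_to_clusters_alt labels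
instance (labels : List Int) (out : List Int) : Decidable (Spec_convert_noise_to_clusters labels out) := by unfold Spec_convert_noise_to_clusters; infer_instance

-- ===== CLAIM (what is proved, stated in full; the proofs are below) =====
def Claim_equal_convert_noise_to_clusters : Prop := ∀ (labels : List Int), Dom_convert_noise_to_clusters labels → Spec_convert_noise_to_clusters labels (convert_noise_to_clusters labels)

-- ===== LEMMAS AND PROOFS =====

-- common functional form: each noise entry gets m+1 with m the running counter
def pvG : List Int → Int → List Int
  | [], _ => []
  | l :: t, m => if l = -1 then (m + 1) :: pvG t (m + 1) else l :: pvG t m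

theorem pv_set_len (pre : List Int) (l v : Int) (t : List Int) :
    (pre ++ l :: t).set pre.length v = pre ++ v :: t := by
  induction pre with
  | nil => simp
  | cons a pre ih => simp [ih]

theorem pvALoop_eq_g : ∀ (rest pre : List Int) (m : Int),
    pvALoop rest pre.length m (pre ++ rest) = pre ++ pvG rest m := by
  intro rest
  induction rest with
  | nil => intro pre m; simp [pvALoop, pvG]
  | cons l t ih =>
    intro pre m
    simp only [pvALoop]
    by_cases hl : l = (-1 : Int)
    · rw [if_pos hl, pv_set_len,
        show pre ++ (m + 1) :: t = (pre ++ [m + 1]) ++ t by simp,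
        show pre.length + 1 = (pre ++ [m + 1]).length by simp,
        ih (pre ++ [m + 1]) (m + 1)]
      simp [pvG, hl]
    · rw [if_neg hl,
        show pre ++ l :: t = (pre ++ [l]) ++ t by simp,
        show pre.length + 1 = (pre ++ [l]).length by simp,
        ih (pre ++ [l]) m]
      simp [pvG, hl]

theorem pvB_eq_g (base : Int) : ∀ (t : List Int) (c : Int),
    ((t.zip (((t.map (fun x => if x = -1 then (1 : Int) else 0)).scanl (· + ·) c).tail)).map
      (fun p => if p.1 = -1 then base + p.2 else p.1)) = pvG t (base + c) := by
  intro t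
  induction t with
  | nil => intro c; simp [pvG]
  | cons l t ih =>
    intro c
    by_cases hl : l = (-1 : Int)
    · simp only [List.map_cons, hl, ite_true, List.scanl_cons, List.tail_cons]
      cases t with
      | nil =>
        simp [pvG]; ring
      | cons y ys =>
        simp only [List.map_cons, List.scanl_cons, List.zip_cons_cons, List.map_cons]
        simp only [ite_true]
        have h := ih (c + 1)
        simp only [List.map_cons, List.scanl_cons, List.tail_cons] at h
        rw [h, show base + (c + 1) = base + c + 1 from by ring]
        simp [pvG]
    · simp only [List.map_cons, if_neg hl, List.scanl_cons, List.tail_cons]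
      cases t with
      | nil =>
        simp [pvG, hl]
      | cons y ys =>
        simp only [List.map_cons, List.scanl_cons, List.zip_cons_cons, List.map_cons]
        have h := ih (c + 0)
        simp only [List.map_cons, List.scanl_cons, List.tail_cons] at h
        rw [h]
        simp [pvG, hl]

-- ===== VERDICT (by name: the statement is the Claim_ definition above) =====
theorem convert_noise_to_clusters_spec : Claim_equal_convert_noise_to_clusters := by
  unfold Claim_equal_convert_noise_to_clusters
  intro labels _
  unfold Spec_convert_noise_to_clusters convert_noise_to_clusters convert_noise_to_clusters_alt
  cases labels with
  | nil => rfl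
  | cons x t =>
    simp only [List.length_cons, gt_iff_lt, Nat.succ_pos, if_pos]
    have hA := pvALoop_eq_g (x :: t) [] ((PySem.List.max? (x :: t) (fun x => x)).getD 0)
    simp only [List.length_nil, List.nil_append] at hA
    rw [hA]
    have hB := pvB_eq_g ((PySem.List.max? (x :: t) (fun x => x)).getD 0) (x :: t) 0
    rw [hB]
    simp
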